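-- pv_equiv track=rewrite | github.com/aaghassi2018/docstring-to-code | code/hw8pr2.py | big_diff
-- ===== SOURCE A (Python) =====
-- def big_diff(nums):
--   large = nums[0]
--   small = nums[0]
--   for i in nums:
--     if(i > large):
--       large = i
--     elif(i < small):
--       small = i
--
--   return large - small
-- ===== SOURCE B (Python) =====
-- def big_diff(nums):
--   s = sorted(nums)
--   return s[-1] - s[0]
-- ===== Notes on version B (the rewrite author's own statement) =====
-- stated objective: alternative
-- what changed: Replaces the single-pass running max/min tracking loop with sorting the list once and subtracting the first sorted element from the last.
import Mathlib
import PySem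

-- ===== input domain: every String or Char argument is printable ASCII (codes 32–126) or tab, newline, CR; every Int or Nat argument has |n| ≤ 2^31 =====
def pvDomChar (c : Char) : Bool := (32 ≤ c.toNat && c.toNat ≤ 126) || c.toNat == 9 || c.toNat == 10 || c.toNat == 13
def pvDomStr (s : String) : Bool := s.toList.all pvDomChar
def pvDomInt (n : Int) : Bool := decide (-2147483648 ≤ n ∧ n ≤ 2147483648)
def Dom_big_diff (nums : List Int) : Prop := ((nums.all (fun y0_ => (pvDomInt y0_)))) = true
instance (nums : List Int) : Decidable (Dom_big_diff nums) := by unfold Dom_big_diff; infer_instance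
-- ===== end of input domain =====

-- B sorts the list once and subtracts sorted endpoints instead of A's running max/min loop; same value on every nonempty list (Pre_ excludes [], where A raises IndexError).


-- ===== PORT A =====
-- nums[0] is pyGet?; on [] Python raises IndexError (excluded by Pre_), the port returns 0 there.
def big_diff (nums : List Int) : Int :=
  match PySem.List.pyGet? nums 0 with
  | none => 0
  | some h =>
    let p := nums.foldl
      (fun (st : Int × Int) i =>
        if i > st.1 then (i, st.2)
        else if i < st.2 then (st.1, i)
        else st) (h, h)
    p.1 - p.2

-- ===== PORT B =====
-- s[-1] / s[0] on the empty sorted list raise in Python (excluded by Pre_); the port returns 0 there.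
def big_diff_alt (nums : List Int) : Int :=
  let s := PySem.List.sorted nums (fun x => x) false
  (PySem.List.pyGet? s (-1)).getD 0 - (PySem.List.pyGet? s 0).getD 0

-- ===== PRECONDITION & SPEC =====
-- Pre_ excludes only the empty list, on which A raises IndexError.
def Pre_big_diff (nums : List Int) : Prop := nums ≠ []
instance (nums : List Int) : Decidable (Pre_big_diff nums) := by unfold Pre_big_diff; infer_instance
def pvWitness_big_diff : List Int := [3, -1, 4]

def Spec_big_diff (nums : List Int) (out : Int) : Prop := out = big_diff_alt nums
instance (nums : List Int) (out : Int) : Decidable (Spec_big_diff nums out) := by unfold Spec_big_diff; infer_instance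

-- ===== CLAIM (what is proved, stated in full; the proofs are below) =====
def Claim_equal_big_diff : Prop := ∀ (nums : List Int), Dom_big_diff nums → Pre_big_diff nums → Spec_big_diff nums (big_diff nums)

-- ===== LEMMAS AND PROOFS =====

-- A's loop with invariant small ≤ large computes (running max, running min).
theorem foldl_step_eq (xs : List Int) (a b : Int) (hba : b ≤ a) :
    xs.foldl (fun (st : Int × Int) i =>
      if i > st.1 then (i, st.2)
      else if i < st.2 then (st.1, i)
      else st) (a, b) = (xs.foldl max a, xs.foldl min b) := by
  induction xs generalizing a b with
  | nil => rfl
  | cons x xs ih =>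
    simp only [List.foldl_cons]
    have hstep : (if x > a then ((x : Int), b)
        else if x < b then (a, x) else (a, b)) = (max a x, min b x) := by
      split_ifs with h1 h2 <;> simp [max_def, min_def] <;> omega
    rw [hstep, ih (max a x) (min b x) (by simp [max_def, min_def]; omega)]

theorem foldl_max_ge (xs : List Int) (a : Int) :
    a ≤ xs.foldl max a ∧ ∀ x ∈ xs, x ≤ xs.foldl max a := by
  induction xs generalizing a with
  | nil => simp
  | cons y ys ih =>
    obtain ⟨h1, h2⟩ := ih (max a y)
    refine ⟨le_trans (le_max_left a y) h1, ?_⟩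
    intro x hx
    rcases List.mem_cons.mp hx with rfl | hx
    · exact le_trans (le_max_right a x) h1
    · exact h2 x hx

theorem foldl_max_mem (xs : List Int) (a : Int) :
    xs.foldl max a = a ∨ xs.foldl max a ∈ xs := by
  induction xs generalizing a with
  | nil => simp
  | cons y ys ih =>
    rcases ih (max a y) with h | h
    · rw [List.foldl_cons, h]
      rcases max_choice a y with h' | h'
      · exact Or.inl h'
      · exact Or.inr (by simp [h'])
    · exact Or.inr (List.mem_cons_of_mem _ h)

theorem foldl_min_le (xs : List Int) (b : Int) :
    xs.foldl min b ≤ b ∧ ∀ x ∈ xs, xs.foldl min b ≤ x := by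
  induction xs generalizing b with
  | nil => simp
  | cons y ys ih =>
    obtain ⟨h1, h2⟩ := ih (min b y)
    refine ⟨le_trans h1 (min_le_left b y), ?_⟩
    intro x hx
    rcases List.mem_cons.mp hx with rfl | hx
    · exact le_trans h1 (min_le_right b x)
    · exact h2 x hx

theorem foldl_min_mem (xs : List Int) (b : Int) :
    xs.foldl min b = b ∨ xs.foldl min b ∈ xs := by
  induction xs generalizing b with
  | nil => simp
  | cons y ys ih =>
    rcases ih (min b y) with h | h
    · rw [List.foldl_cons, h]
      rcases min_choice b y with h' | h'
      · exact Or.inl h'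
      · exact Or.inr (by simp [h'])
    · exact Or.inr (List.mem_cons_of_mem _ h)

-- in a ≤-sorted list every element is ≤ the last one
theorem pairwise_le_getLast (l : List Int) (hp : l.Pairwise (· ≤ ·)) (hne : l ≠ []) :
    ∀ y ∈ l, y ≤ l.getLast hne := by
  induction l with
  | nil => simp at hne
  | cons x xs ih =>
    intro y hy
    rcases List.mem_cons.mp hy with rfl | hy
    · cases xs with
      | nil => simp [List.getLast]
      | cons z zs =>
        have hx : y ≤ (z :: zs).getLast (by simp) :=
          le_trans (List.rel_of_pairwise_cons hp (by simp))
            (ih (List.Pairwise.of_cons hp) (by simp) z (by simp))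
        simpa [List.getLast] using hx
    · cases xs with
      | nil => simp at hy
      | cons z zs =>
        have := ih (List.Pairwise.of_cons hp) (by simp) y hy
        simpa [List.getLast] using this

-- ===== VERDICT (by name: the statement is the Claim_ definition above) =====
theorem big_diff_spec : Claim_equal_big_diff := by
  intro nums _ hpre
  unfold Spec_big_diff big_diff big_diff_alt
  obtain ⟨h, t, rfl⟩ := List.exists_cons_of_ne_nil hpre
  rw [PySem.List.pyGet?_zero_cons]
  simp only
  rw [foldl_step_eq _ h h le_rfl]
  set s := PySem.List.sorted (h :: t) (fun x => x) false with hs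
  have hsne : s ≠ [] := by
    rw [hs, Ne, PySem.List.sorted_eq_nil_iff]; simp
  have hperm : s.Perm (h :: t) := PySem.List.sorted_perm _ _ _
  have hpw : s.Pairwise (· ≤ ·) := by
    simpa using PySem.List.sorted_pairwise (h :: t) (fun x => x)
  -- endpoints of s
  rw [PySem.List.pyGet?_neg_one]
  rw [List.getLast?_eq_some_getLast hsne]
  obtain ⟨m, s', hcons⟩ := List.exists_cons_of_ne_nil hsne
  have hhead : ∀ y ∈ (h :: t), m ≤ y := by
    have := PySem.List.key_head_sorted_le (xs := h :: t) (key := fun x => x) (by rw [← hs, hcons])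
    simpa using this
  have hheadmem : m ∈ (h :: t) := hperm.mem_iff.mp (by simp [hcons])
  -- max part
  have hmax : (h :: t).foldl max h = s.getLast hsne := by
    have hLmem : s.getLast hsne ∈ (h :: t) := hperm.mem_iff.mp (List.getLast_mem hsne)
    have hub := pairwise_le_getLast s hpw hsne
    obtain ⟨hge, hub'⟩ := foldl_max_ge (h :: t) h
    apply le_antisymm
    · rcases foldl_max_mem (h :: t) h with hm | hm
      · rw [hm]; exact hub h (hperm.mem_iff.mpr (by simp))
      · exact hub _ (hperm.mem_iff.mpr hm)
    · exact hub' _ hLmem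
  -- min part
  have hmin : (h :: t).foldl min h = m := by
    obtain ⟨hle, hlb⟩ := foldl_min_le (h :: t) h
    have hfmem : (h :: t).foldl min h ∈ (h :: t) := by
      rcases foldl_min_mem (h :: t) h with hm | hm
      · rw [hm]; simp
      · exact hm
    exact le_antisymm (hlb m hheadmem) (hhead _ hfmem)
  have hget0 : PySem.List.pyGet? s 0 = some m := by
    rw [hcons]; exact PySem.List.pyGet?_zero_cons m s'
  rw [hmax, hmin, hget0]
  simp
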